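-- pv_equiv track=rewrite | github.com/tmquan/embeddings | 02_embedding_verification_progress.py | dataset_status
-- ===== SOURCE A (Python) =====
-- from typing import Any, Dict, List, Optional, Tuple
--
-- def dataset_status(sub_results: List[Dict[str, Any]]) -> str:
--     statuses = {r["status"] for r in sub_results}
--     if statuses == {"complete"}:
--         return "complete"
--     if "complete" in statuses or "partial_embeddings" in statuses or "preprocessed_only" in statuses:
--         return "partial"
--     if statuses <= {"started_empty", "not_started"}:
--         if "started_empty" in statuses:
--             return "partial"
--         return "not_started"
--     return "partial"
-- ===== SOURCE B (Python) =====
-- from typing import Any, Dict, List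
--
-- def dataset_status(sub_results: List[Dict[str, Any]]) -> str:
--     sts = [r["status"] for r in sub_results]
--     if sts and all(s == "complete" for s in sts):
--         return "complete"
--     if all(s == "not_started" for s in sts):
--         return "not_started"
--     return "partial"
-- ===== Notes on version B (the rewrite author's own statement) =====
-- stated objective: simpler
-- what changed: Replaces A's set comprehension plus set-equality/membership/subset branch chain by two all-scans over the raw status list: nonempty-and-all-'complete' gives 'complete', all-'not_started' gives 'not_started', anything else 'partial'.
import Mathlib
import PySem

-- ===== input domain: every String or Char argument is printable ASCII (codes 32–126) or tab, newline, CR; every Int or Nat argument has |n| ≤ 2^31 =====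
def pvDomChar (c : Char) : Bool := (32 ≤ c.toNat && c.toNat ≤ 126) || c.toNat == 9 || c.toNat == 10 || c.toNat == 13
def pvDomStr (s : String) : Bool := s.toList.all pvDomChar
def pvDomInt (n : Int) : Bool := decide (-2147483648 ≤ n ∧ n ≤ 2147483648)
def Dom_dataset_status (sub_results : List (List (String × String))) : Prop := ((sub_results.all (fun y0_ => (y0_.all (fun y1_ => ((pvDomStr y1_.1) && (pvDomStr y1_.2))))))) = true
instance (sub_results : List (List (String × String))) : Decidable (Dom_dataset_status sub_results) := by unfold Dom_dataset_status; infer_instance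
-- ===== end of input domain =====

-- B replaces A's set building plus set-equality/membership/subset tests by two plain
-- all-scans over the status list (objective: simpler, same cost).

-- r["status"]: first match in the association list; Pre_ guarantees the key is present,
-- so the "" default is never used on admitted inputs (Python raises KeyError there).
def statusOf (r : List (String × String)) : String :=
  ((PySem.Dict.mk r).get? "status").getD ""

-- ===== PORT A =====
def dataset_status (sub_results : List (List (String × String))) : String :=
  let statuses : PySem.Set String := PySem.Set.ofList (sub_results.map statusOf)
  if PySem.Set.equal statuses (PySem.Set.ofList ["complete"]) then "complete"
  else if PySem.Set.contains statuses "complete" || PySem.Set.contains statuses "partial_embeddings" || PySem.Set.contains statuses "preprocessed_only" then "partial"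
  else if PySem.Set.issubset statuses (PySem.Set.ofList ["started_empty", "not_started"]) then
    (if PySem.Set.contains statuses "started_empty" then "partial" else "not_started")
  else "partial"

-- ===== PORT B =====
def dataset_status_alt (sub_results : List (List (String × String))) : String :=
  let sts := sub_results.map statusOf
  if !sts.isEmpty && sts.all (fun s => s == "complete") then "complete"
  else if sts.all (fun s => s == "not_started") then "not_started"
  else "partial"

-- ===== PRECONDITION & SPEC =====
-- Pre_ excludes exactly the inputs where some sub-result lacks the "status" key, on which A raises KeyError.
def Pre_dataset_status (sub_results : List (List (String × String))) : Prop :=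
  ∀ r ∈ sub_results, "status" ∈ r.map (·.1)
instance (sub_results : List (List (String × String))) : Decidable (Pre_dataset_status sub_results) := by unfold Pre_dataset_status; infer_instance
def pvWitness_dataset_status : (List (List (String × String))) := [[("status", "complete")], [("status", "not_started")]]

def Spec_dataset_status (sub_results : List (List (String × String))) (out : String) : Prop := out = dataset_status_alt sub_results
instance (sub_results : List (List (String × String))) (out : String) : Decidable (Spec_dataset_status sub_results out) := by unfold Spec_dataset_status; infer_instance

-- ===== CLAIM (what is proved, stated in full; the proofs are below) =====
def Claim_equal_dataset_status : Prop := ∀ (sub_results : List (List (String × String))), Dom_dataset_status sub_results → Pre_dataset_status sub_results → Spec_dataset_status sub_results (dataset_status sub_results)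

-- ===== LEMMAS AND PROOFS =====

lemma mem_complete_of_all {sts : List String} (hne : sts ≠ [])
    (hall : ∀ x ∈ sts, x = "complete") : "complete" ∈ sts := by
  rcases List.exists_mem_of_ne_nil sts hne with ⟨y, hy⟩
  exact hall y hy ▸ hy

-- the two branch structures agree on every list of statuses
lemma dataset_status_core (sts : List String) :
    (if PySem.Set.equal (PySem.Set.ofList sts) (PySem.Set.ofList ["complete"]) then "complete"
     else if PySem.Set.contains (PySem.Set.ofList sts) "complete" || PySem.Set.contains (PySem.Set.ofList sts) "partial_embeddings" || PySem.Set.contains (PySem.Set.ofList sts) "preprocessed_only" then "partial"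
     else if PySem.Set.issubset (PySem.Set.ofList sts) (PySem.Set.ofList ["started_empty", "not_started"]) then
       (if PySem.Set.contains (PySem.Set.ofList sts) "started_empty" then "partial" else "not_started")
     else "partial")
    = (if !sts.isEmpty && sts.all (fun s => s == "complete") then "complete"
       else if sts.all (fun s => s == "not_started") then "not_started"
       else "partial") := by
  split_ifs <;> try rfl
  all_goals
    exfalso
    simp only [PySem.Set.equal_iff, PySem.Set.contains_iff, PySem.Set.issubset_iff,
      PySem.Set.mem_ofList, Bool.and_eq_true, Bool.not_eq_true', List.isEmpty_eq_false_iff,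
      List.all_eq_true, beq_iff_eq, Bool.or_eq_true, List.mem_cons, List.not_mem_nil,
      or_false] at *
  · rename_i h1 h2 h3
    exact absurd (h3 _ ((h1 "complete").mpr rfl)) (by decide)
  · rename_i h1 h2 h3
    exact h2 ⟨List.ne_nil_of_mem ((h1 "complete").mpr rfl), fun x hx => (h1 x).mp hx⟩
  · rename_i h1 h2 h3
    exact h1 fun x => ⟨fun hx => h3.2 x hx, fun hx => hx ▸ mem_complete_of_all h3.1 h3.2⟩
  · rename_i h1 h2 h3 h4
    rcases h2 with (h | h) | h <;> exact absurd (h4 _ h) (by decide)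
  · rename_i h1 h2 h3 h4 h5
    exact absurd (h5.2 _ h4) (by decide)
  · rename_i h1 h2 h3 h4 h5 h6
    exact absurd (h6 _ h4) (by decide)
  · rename_i h1 h2 h3 h4 h5
    exact h2 (Or.inl (Or.inl (mem_complete_of_all h5.1 h5.2)))
  · rename_i h1 h2 h3 h4 h5 h6
    apply h6
    intro x hx
    rcases h3 x hx with h | h
    · exact absurd (h ▸ hx) h4
    · exact h
  · rename_i h1 h2 h3 h4
    exact h2 (Or.inl (Or.inl (mem_complete_of_all h4.1 h4.2)))
  · rename_i h1 h2 h3 h4 h5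
    exact h3 fun x hx => Or.inr (h5 x hx)

-- ===== VERDICT (by name: the statement is the Claim_ definition above) =====
theorem dataset_status_spec : Claim_equal_dataset_status := by
  intro sub_results _ _
  unfold Spec_dataset_status dataset_status dataset_status_alt
  exact dataset_status_core (sub_results.map statusOf)
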